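-- pv_equiv track=rewrite | github.com/adematti/cosmopipe | cosmopipe/lib/utils.py | txt_to_latex
-- ===== SOURCE A (Python) =====
-- def txt_to_latex(txt):
--     """Transform standard text into latex by replacing '_xxx' with '_{xxx}' and '^xxx' with '^{xxx}'."""
--     latex = ''
--     txt = list(txt)
--     for c in txt:
--         latex += c
--         if c in ['_','^']:
--             latex += '{'
--             txt += '}'
--     return latex
-- ===== SOURCE B (Python) =====
-- def txt_to_latex(txt):
--     """Transform standard text into latex by replacing '_xxx' with '_{xxx}' and '^xxx' with '^{xxx}'."""
--     out = []
--     n = 0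
--     for c in list(txt):
--         out.append(c)
--         if c in ('_', '^'):
--             out.append('{')
--             n += 1
--     out.append('}' * n)
--     return ''.join(out)
-- ===== Notes on version B (the rewrite author's own statement) =====
-- stated objective: simpler
-- what changed: Replaces A's trick of appending '}' to the list being iterated (self-mutating iteration, quadratic string concatenation) with a single pass that appends '{' and counts deferred closing braces, emitting '}'*n once at the end and joining a list.
import Mathlib
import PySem

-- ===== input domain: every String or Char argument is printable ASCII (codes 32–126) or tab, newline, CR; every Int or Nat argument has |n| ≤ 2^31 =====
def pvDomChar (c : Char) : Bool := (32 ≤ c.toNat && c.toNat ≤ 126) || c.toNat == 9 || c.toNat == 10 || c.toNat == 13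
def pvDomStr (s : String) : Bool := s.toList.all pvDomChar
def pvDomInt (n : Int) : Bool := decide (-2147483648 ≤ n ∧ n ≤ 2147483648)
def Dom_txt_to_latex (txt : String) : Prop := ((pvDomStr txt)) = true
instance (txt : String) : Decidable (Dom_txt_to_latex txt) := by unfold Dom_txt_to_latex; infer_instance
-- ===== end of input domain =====

-- B replaces A's self-mutating-list iteration (all '}' pile up at the end) by one pass
-- that counts deferred closing braces and appends '}'*n once at the end (objective: simpler).

-- ===== PORT A =====
-- A's for-loop over a list that A itself extends with '}' whenever c is '_' or '^';
-- modelled as recursion on the remaining queue, appending '}' to its end in the special branch.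
-- Terminates because the appended '}' are not special: measure = length + number of '_'/'^' left.
def txtAuxA : List Char → String → String
  | [], latex => latex
  | c :: cs, latex =>
    if c = '_' ∨ c = '^' then
      txtAuxA (cs ++ ['}']) ((latex.push c).push '{')
    else
      txtAuxA cs (latex.push c)
termination_by rest _ => rest.length + (rest.filter (fun c => c = '_' ∨ c = '^')).length
decreasing_by
  · simp_all [List.filter_append, List.filter]
  · simp_all [List.filter]

def txt_to_latex (txt : String) : String := txtAuxA txt.toList ""

-- ===== PORT B =====
def txt_to_latex_alt (txt : String) : String :=
  let st := txt.toList.foldl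
    (fun (st : List Char × Nat) c =>
      if c = '_' ∨ c = '^' then (st.1 ++ [c, '{'], st.2 + 1) else (st.1 ++ [c], st.2))
    ([], 0)
  String.ofList (st.1 ++ List.replicate st.2 '}')

-- ===== PRECONDITION & SPEC =====
def Spec_txt_to_latex (txt : String) (out : String) : Prop := out = txt_to_latex_alt txt
instance (txt : String) (out : String) : Decidable (Spec_txt_to_latex txt out) := by unfold Spec_txt_to_latex; infer_instance

-- ===== CLAIM (what is proved, stated in full; the proofs are below) =====
def Claim_equal_txt_to_latex : Prop := ∀ (txt : String), Dom_txt_to_latex txt → Spec_txt_to_latex txt (txt_to_latex txt)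

-- ===== LEMMAS AND PROOFS =====

-- the characters both programs emit for the scanned chars (without the trailing '}'s)
def pvEmit : List Char → List Char
  | [] => []
  | c :: cs => if c = '_' ∨ c = '^' then c :: '{' :: pvEmit cs else c :: pvEmit cs

-- the number of deferred closing braces
def pvCnt : List Char → Nat
  | [] => 0
  | c :: cs => (if c = '_' ∨ c = '^' then 1 else 0) + pvCnt cs

theorem pvEmit_append_close (l : List Char) : pvEmit (l ++ ['}']) = pvEmit l ++ ['}'] := by
  induction l with
  | nil => simp [pvEmit]
  | cons c cs ih => simp [pvEmit, ih]; split <;> simp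

theorem pvCnt_append_close (l : List Char) : pvCnt (l ++ ['}']) = pvCnt l := by
  induction l with
  | nil => simp [pvCnt]
  | cons c cs ih => simp [pvCnt, ih]

theorem txtAuxA_eq (l : List Char) (latex : String) :
    (txtAuxA l latex).toList = latex.toList ++ pvEmit l ++ List.replicate (pvCnt l) '}' := by
  induction l, latex using txtAuxA.induct with
  | case1 latex => simp [txtAuxA, pvEmit, pvCnt]
  | case2 c cs latex h ih =>
    rw [txtAuxA, if_pos h, ih, pvEmit_append_close, pvCnt_append_close]
    simp [pvEmit, pvCnt, if_pos h, String.toList_push]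
    rw [Nat.add_comm, List.replicate_succ]
  | case3 c cs latex h ih =>
    rw [txtAuxA, if_neg h, ih]
    simp [pvEmit, pvCnt, if_neg h, String.toList_push]

theorem foldB_eq (l : List Char) (acc : List Char) (m : Nat) :
    l.foldl (fun (st : List Char × Nat) c =>
        if c = '_' ∨ c = '^' then (st.1 ++ [c, '{'], st.2 + 1) else (st.1 ++ [c], st.2))
      (acc, m) = (acc ++ pvEmit l, m + pvCnt l) := by
  induction l generalizing acc m with
  | nil => simp [pvEmit, pvCnt]
  | cons c cs ih =>
    simp only [List.foldl]
    split
    · rw [ih]; simp [pvEmit, pvCnt, *]; omega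
    · rw [ih]; simp [pvEmit, pvCnt, *]

-- ===== VERDICT (by name: the statement is the Claim_ definition above) =====
theorem txt_to_latex_spec : Claim_equal_txt_to_latex := by
  intro txt _
  show txt_to_latex txt = txt_to_latex_alt txt
  have h := txtAuxA_eq txt.toList ""
  rw [txt_to_latex, txt_to_latex_alt]
  apply String.toList_inj.mp
  rw [h]
  simp [foldB_eq, String.toList_ofList]
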